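-- pv_equiv track=rewrite | github.com/MedVietAI/processing | utils/cloud_llm.py | _is_invalid_response
-- ===== SOURCE A (Python) =====
-- def _is_invalid_response(text: str) -> bool:
--     """Check if response is invalid"""
--     if not text or not isinstance(text, str):
--         return True
--
--     text_lower = text.lower().strip()
--     invalid_patterns = [
--         "fail", "invalid", "i couldn't", "i can't", "i cannot", "unable to",
--         "sorry", "error", "not available", "no answer", "insufficient",
--         "don't know", "do not know", "not sure", "cannot determine",
--         "unable to provide", "not possible", "not applicable", "n/a"
--     ]
--
--     if len(text_lower) < 3:
--         return True
--
--     for pattern in invalid_patterns: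
--         if pattern in text_lower:
--             return True
--
--     return False
-- ===== SOURCE B (Python) =====
-- # B: single left-to-right suffix scan of the cleaned text (does any pattern start at this
-- # position?) instead of A's pattern-major loop of per-pattern whole-text substring tests; the
-- # length guard is folded into one boolean expression.
-- _PATTERNS = (
--     "fail", "invalid", "i couldn't", "i can't", "i cannot", "unable to",
--     "sorry", "error", "not available", "no answer", "insufficient",
--     "don't know", "do not know", "not sure", "cannot determine",
--     "unable to provide", "not possible", "not applicable", "n/a",
-- )
--
--
-- def _hit(t, i):
--     # while-style suffix scan: does some pattern start at position i, i+1, ... ?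
--     while i < len(t):
--         if any(t.startswith(p, i) for p in _PATTERNS):
--             return True
--         i += 1
--     return False
--
--
-- def _is_invalid_response(text: str) -> bool:
--     if not text or not isinstance(text, str):
--         return True
--     t = text.lower().strip()
--     return len(t) < 3 or _hit(t, 0)
-- ===== Notes on version B (the rewrite author's own statement) =====
-- stated objective: alternative
-- what changed: A loops over the pattern list and rescans the whole cleaned text once per pattern via a substring membership test; B makes a single position-by-position suffix scan of the cleaned text, asking at each index whether any pattern starts there, with the length guard folded into one boolean expression.
import Mathlib
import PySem

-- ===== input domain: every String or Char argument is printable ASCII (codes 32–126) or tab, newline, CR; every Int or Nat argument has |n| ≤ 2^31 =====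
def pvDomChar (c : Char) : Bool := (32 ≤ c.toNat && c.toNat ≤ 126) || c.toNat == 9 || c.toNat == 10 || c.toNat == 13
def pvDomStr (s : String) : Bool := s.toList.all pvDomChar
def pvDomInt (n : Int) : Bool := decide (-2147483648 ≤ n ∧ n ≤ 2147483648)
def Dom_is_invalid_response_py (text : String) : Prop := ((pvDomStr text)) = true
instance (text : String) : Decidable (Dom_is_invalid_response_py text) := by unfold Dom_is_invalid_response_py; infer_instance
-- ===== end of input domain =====

-- B replaces A's pattern-major loop of whole-text substring tests by a single recursive
-- suffix scan of the cleaned text (alternative decomposition, same cost class).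

-- the shared module-level pattern list (identical literal in Source A and Source B)
def pvPatterns : List String :=
  ["fail", "invalid", "i couldn't", "i can't", "i cannot", "unable to",
   "sorry", "error", "not available", "no answer", "insufficient",
   "don't know", "do not know", "not sure", "cannot determine",
   "unable to provide", "not possible", "not applicable", "n/a"]

-- ===== PORT A =====
def is_invalid_response_py (text : String) : Bool :=
  if text == "" then true
  else
    let text_lower := PySem.Str.strip (PySem.Str.lower text)
    if PySem.Str.len text_lower < 3 then true
    else
      -- for pattern in invalid_patterns: if pattern in text_lower: return True
      pvPatterns.any (fun pattern => PySem.Str.isIn pattern text_lower)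

-- ===== PORT B =====
-- _hit(t, i): while i < len(t): if any pattern starts at i, True; i += 1 — i.e. a
-- structural recursion over the successive suffixes of t
def pvHit : List Char → Bool
  | [] => false
  | c :: rest =>
      pvPatterns.any (fun p => PySem.Chars.startswith (c :: rest) p.toList) || pvHit rest

def is_invalid_response_py_alt (text : String) : Bool :=
  if text == "" then true
  else
    let t := PySem.Str.strip (PySem.Str.lower text)
    decide (PySem.Str.len t < 3) || pvHit t.toList

-- ===== PRECONDITION & SPEC =====
def Spec_is_invalid_response_py (text : String) (out : Bool) : Prop := out = is_invalid_response_py_alt text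
instance (text : String) (out : Bool) : Decidable (Spec_is_invalid_response_py text out) := by unfold Spec_is_invalid_response_py; infer_instance

-- ===== CLAIM =====
def Claim_equal_is_invalid_response_py : Prop := ∀ (text : String), Dom_is_invalid_response_py text → Spec_is_invalid_response_py text (is_invalid_response_py text)

-- ===== LEMMAS AND PROOFS =====

-- The suffix scan succeeds iff some (nonempty) pattern is an infix of the text.
theorem pvHit_iff (s : List Char) :
    pvHit s = true ↔ ∃ p ∈ pvPatterns, p.toList <:+: s := by
  induction s with
  | nil =>
      simp only [pvHit, Bool.false_eq_true, false_iff]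
      rintro ⟨p, hp, hinf⟩
      have hne : ∀ q ∈ pvPatterns, q.toList ≠ ([] : List Char) := by decide
      exact hne p hp (List.eq_nil_of_infix_nil hinf)
  | cons c rest ih =>
      simp only [pvHit, Bool.or_eq_true, List.any_eq_true, PySem.Chars.startswith_iff, ih]
      constructor
      · rintro (⟨p, hp, hpre⟩ | ⟨p, hp, hinf⟩)
        · exact ⟨p, hp, hpre.isInfix⟩
        · exact ⟨p, hp, hinf.trans (List.infix_cons_iff.mpr (Or.inr (List.infix_refl _)))⟩
      · rintro ⟨p, hp, hinf⟩
        rcases List.infix_cons_iff.mp hinf with hpre | hinf'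
        · exact Or.inl ⟨p, hp, hpre⟩
        · exact Or.inr ⟨p, hp, hinf'⟩

-- ===== VERDICT =====
theorem is_invalid_response_py_spec : Claim_equal_is_invalid_response_py := by
  intro text _
  unfold Spec_is_invalid_response_py is_invalid_response_py is_invalid_response_py_alt
  by_cases h0 : text == ""
  · simp only [h0, if_true]
  · simp only [h0, Bool.false_eq_true, if_false]
    set t := PySem.Str.strip (PySem.Str.lower text) with ht
    by_cases hlen : PySem.Str.len t < 3
    · rw [if_pos hlen, decide_eq_true hlen, Bool.true_or]
    · rw [if_neg hlen, decide_eq_false hlen, Bool.false_or]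
      apply Bool.eq_iff_iff.mpr
      rw [pvHit_iff]
      simp only [List.any_eq_true, PySem.Str.isIn_iff_infix]
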